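-- pv_equiv track=rewrite | github.com/mbedek01/Algorithms | sep2020/1248_No_of_subarrays_with_k_odd_numbers.py | evenSubarray
-- ===== SOURCE A (Python) =====
-- def evenSubarray(nums, k):
--     N = len(nums)
--     count = 0
--     subArrays = []
--
--     # first we find out all possible subarrays
--     for i in range(0, N):
--         for j in range(i, N):
--             arr = []
--             for p in range(i, j+1):
--                 arr.append(nums[p])
--             subArrays.append(arr)
--
--     print (subArrays)
--
--     # check for each subarray, determine if it has k or less odd numbers --> if yes, increment count
--     for arr in subArrays:
--         print (arr)
--         if len(arr) < k:
--             continue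
--         else:
--             odd = 0
--             for num in arr:
--                 if(num % 2 == 1):
--                     odd += 1
--             if odd <= k:
--                 count += 1
--
--     return count
-- ===== SOURCE B (Python) =====
-- def evenSubarray(nums, k):
--     # One pass per start index with a running odd counter: no subarray
--     # materialization and no per-subarray rescan (O(N^2) vs A's O(N^3)).
--     N = len(nums)
--     count = 0
--     for i in range(N):
--         odd = 0
--         for j in range(i, N):
--             if nums[j] % 2 == 1:
--                 odd += 1
--             if j - i + 1 >= k and odd <= k:
--                 count += 1
--     return count
-- ===== Notes on version B (the rewrite author's own statement) =====
-- stated objective: faster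
-- what changed: Instead of materializing every subarray and rescanning each one to count its odd elements, B extends a running odd counter per start index and tests each (start,end) pair in O(1).
import Mathlib
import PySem

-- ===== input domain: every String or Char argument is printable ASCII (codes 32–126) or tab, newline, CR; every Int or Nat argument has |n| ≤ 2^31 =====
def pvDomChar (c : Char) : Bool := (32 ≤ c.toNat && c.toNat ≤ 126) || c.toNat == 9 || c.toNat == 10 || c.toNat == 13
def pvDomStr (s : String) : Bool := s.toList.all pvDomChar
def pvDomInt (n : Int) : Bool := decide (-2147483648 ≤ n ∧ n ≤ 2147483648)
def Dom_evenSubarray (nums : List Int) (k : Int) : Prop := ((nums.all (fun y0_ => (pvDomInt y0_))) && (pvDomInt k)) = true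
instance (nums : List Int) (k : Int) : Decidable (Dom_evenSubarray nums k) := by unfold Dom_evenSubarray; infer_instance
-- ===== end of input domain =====

-- B replaces A's materialize-all-subarrays-then-rescan scheme by a running odd
-- counter per start index (O(n^2) instead of O(n^3)); B omits A's debug prints.

-- ===== PORT A =====
def evenSubarray (nums : List Int) (k : Int) : Int :=
  let N : Int := (nums.length : Int)
  let subArrays : List (List Int) :=
    (PySem.List.pyRange 0 N 1).foldl (fun acc i =>
      (PySem.List.pyRange i N 1).foldl (fun acc j =>
        let arr : List Int :=
          (PySem.List.pyRange i (j+1) 1).foldl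
            (fun a p => a ++ [PySem.List.pyGetD nums p 0]) []
        acc ++ [arr]) acc) []
  -- (the two 'print' statements produce no value and are not ported)
  subArrays.foldl (fun count arr =>
    if (arr.length : Int) < k then count
    else
      let odd : Int := arr.foldl
        (fun odd num => if PySem.Int.mod num 2 = 1 then odd + 1 else odd) 0
      if odd ≤ k then count + 1 else count) 0

-- ===== PORT B =====
def evenSubarray_alt (nums : List Int) (k : Int) : Int :=
  let N : Int := (nums.length : Int)
  (PySem.List.pyRange 0 N 1).foldl (fun count i =>
    ((PySem.List.pyRange i N 1).foldl (fun (s : Int × Int) j =>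
      let odd : Int :=
        if PySem.Int.mod (PySem.List.pyGetD nums j 0) 2 = 1 then s.2 + 1 else s.2
      let count : Int := if k ≤ j - i + 1 ∧ odd ≤ k then s.1 + 1 else s.1
      (count, odd)) (count, 0)).1) 0

-- ===== PRECONDITION & SPEC =====
def Spec_evenSubarray (nums : List Int) (k : Int) (out : Int) : Prop := out = evenSubarray_alt nums k
instance (nums : List Int) (k : Int) (out : Int) : Decidable (Spec_evenSubarray nums k out) := by unfold Spec_evenSubarray; infer_instance

-- ===== CLAIM (what is proved, stated in full; the proofs are below) =====
def Claim_equal_evenSubarray : Prop := ∀ (nums : List Int) (k : Int), Dom_evenSubarray nums k → Spec_evenSubarray nums k (evenSubarray nums k)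

-- ===== LEMMAS AND PROOFS =====

-- number of odd elements (Python parity) among nums[p] for p in range(i, m)
def pvOddIn (nums : List Int) (i m : Int) : Int :=
  (((PySem.List.pyRange i m 1).countP
    (fun p => decide (PySem.Int.mod (PySem.List.pyGetD nums p 0) 2 = 1))) : Int)

-- per-pair contribution, in B's form
def pvCnt (nums : List Int) (k i j : Int) : Int :=
  if k ≤ j - i + 1 ∧ pvOddIn nums i (j+1) ≤ k then 1 else 0

-- reference double sum
def pvRef (nums : List Int) (k : Int) : Int :=
  (((PySem.List.pyRange 0 (nums.length : Int) 1).map (fun i =>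
    (((PySem.List.pyRange i (nums.length : Int) 1).map (pvCnt nums k i))).sum)).sum)

theorem pvOddIn_self (nums : List Int) (i : Int) : pvOddIn nums i i = 0 := by
  simp [pvOddIn, PySem.List.pyRange_one_eq_nil le_rfl]

theorem pvOddIn_succ (nums : List Int) (i m : Int) (h : i ≤ m) :
    pvOddIn nums i (m+1)
      = pvOddIn nums i m
        + (if PySem.Int.mod (PySem.List.pyGetD nums m 0) 2 = 1 then 1 else 0) := by
  unfold pvOddIn
  rw [PySem.List.pyRange_one_succ_right (a := i) (b := m) h]
  simp [List.countP_append]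

theorem pvA_count_loop (k : Int) (l : List (List Int)) (c : Int) :
    l.foldl (fun count arr =>
      if (arr.length : Int) < k then count
      else
        let odd : Int := arr.foldl
          (fun odd num => if PySem.Int.mod num 2 = 1 then odd + 1 else odd) 0
        if odd ≤ k then count + 1 else count) c
    = c + (l.map (fun arr =>
        if (arr.length : Int) < k then 0
        else if (((arr.countP (fun num => decide (PySem.Int.mod num 2 = 1))) : Int)) ≤ k
        then 1 else 0)).sum := by
  induction l generalizing c with
  | nil => simp
  | cons a l ih =>
    simp only [List.foldl_cons, List.map_cons, List.sum_cons, ih]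
    have hodd : ∀ (o : Int) (arr : List Int),
        arr.foldl (fun odd num => if PySem.Int.mod num 2 = 1 then odd + 1 else odd) o
          = o + ((arr.countP (fun num => decide (PySem.Int.mod num 2 = 1))) : Int) := by
      intro o arr
      induction arr generalizing o with
      | nil => simp
      | cons x t ih2 =>
        simp only [List.foldl_cons, ih2, List.countP_cons]
        split_ifs <;> simp_all <;> omega
    simp only [hodd 0, zero_add]
    split_ifs <;> omega

theorem pvFoldl_congr {α β : Type} {l : List α} {f g : β → α → β} {init : β}
    (h : ∀ b a, a ∈ l → f b a = g b a) : l.foldl f init = l.foldl g init := by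
  induction l generalizing init with
  | nil => rfl
  | cons a t ih => simp only [List.foldl_cons, h init a (by simp)]; exact ih (fun b x hx => h b x (by simp [hx]))

-- A's materialized subArrays list
theorem pvA_subarrays (nums : List Int) :
    ((PySem.List.pyRange 0 (nums.length : Int) 1).foldl (fun acc i =>
      (PySem.List.pyRange i (nums.length : Int) 1).foldl (fun acc j =>
        acc ++ [(PySem.List.pyRange i (j+1) 1).foldl
          (fun a p => a ++ [PySem.List.pyGetD nums p 0]) []]) acc) [])
    = (PySem.List.pyRange 0 (nums.length : Int) 1).flatMap (fun i =>
        (PySem.List.pyRange i (nums.length : Int) 1).map (fun j =>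
          (PySem.List.pyRange i (j+1) 1).map (fun p => PySem.List.pyGetD nums p 0))) := by
  have hinner : ∀ (i : Int) (acc : List (List Int)),
      (PySem.List.pyRange i (nums.length : Int) 1).foldl (fun acc j =>
        acc ++ [(PySem.List.pyRange i (j+1) 1).foldl
          (fun a p => a ++ [PySem.List.pyGetD nums p 0]) []]) acc
      = acc ++ (PySem.List.pyRange i (nums.length : Int) 1).map (fun j =>
          (PySem.List.pyRange i (j+1) 1).map (fun p => PySem.List.pyGetD nums p 0)) := by
    intro i acc
    have harr : ∀ j : Int,
        (PySem.List.pyRange i (j+1) 1).foldl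
          (fun a p => a ++ [PySem.List.pyGetD nums p 0]) []
        = (PySem.List.pyRange i (j+1) 1).map (fun p => PySem.List.pyGetD nums p 0) := by
      intro j
      simpa using PySem.List.foldl_append_singleton_eq_map
        (l := PySem.List.pyRange i (j+1) 1) (f := fun p => PySem.List.pyGetD nums p 0) (acc := [])
    simp only [harr]
    exact PySem.List.foldl_append_singleton_eq_map ..
  calc _ = (PySem.List.pyRange 0 (nums.length : Int) 1).foldl (fun acc i =>
            acc ++ (PySem.List.pyRange i (nums.length : Int) 1).map (fun j =>
              (PySem.List.pyRange i (j+1) 1).map (fun p => PySem.List.pyGetD nums p 0))) [] := by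
          apply pvFoldl_congr
          intro acc i _
          exact hinner i acc
    _ = _ := by rw [PySem.List.foldl_append_eq_flatMap]; simp only [List.nil_append]

theorem pvSum_map_flatMap {α β : Type} (l : List α) (g : α → List β) (h : β → Int) :
    ((l.flatMap g).map h).sum = (l.map (fun a => ((g a).map h).sum)).sum := by
  induction l with
  | nil => simp
  | cons a t ih => simp [List.flatMap_cons, ih]

theorem pvA_eq_ref (nums : List Int) (k : Int) :
    evenSubarray nums k = pvRef nums k := by
  unfold evenSubarray
  simp only []
  rw [pvA_subarrays nums, pvA_count_loop, pvSum_map_flatMap]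
  unfold pvRef
  rw [zero_add]
  apply congrArg
  apply List.map_congr_left
  intro i hi
  rw [List.map_map]
  apply congrArg
  apply List.map_congr_left
  intro j hj
  simp only [Function.comp_apply]
  rw [PySem.List.mem_pyRange_one] at hi hj
  have hlen : (((PySem.List.pyRange i (j+1) 1).map
      (fun p => PySem.List.pyGetD nums p 0)).length : Int) = j + 1 - i := by
    simp [PySem.List.length_pyRange_one]
    omega
  rw [List.countP_map]
  unfold pvCnt pvOddIn
  rw [hlen]
  have : (fun p => decide (PySem.Int.mod (PySem.List.pyGetD nums p 0) 2 = 1))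
       = ((fun num => decide (PySem.Int.mod num 2 = 1)) ∘ fun p => PySem.List.pyGetD nums p 0) := rfl
  rw [this]
  split_ifs <;> omega

theorem pvB_inner (nums : List Int) (k i : Int) (c : Int) (n : Nat) :
    (PySem.List.pyRange i (i + n) 1).foldl (fun (s : Int × Int) j =>
      let odd : Int :=
        if PySem.Int.mod (PySem.List.pyGetD nums j 0) 2 = 1 then s.2 + 1 else s.2
      let count : Int := if k ≤ j - i + 1 ∧ odd ≤ k then s.1 + 1 else s.1
      (count, odd)) (c, 0)
    = (c + ((PySem.List.pyRange i (i + n) 1).map (pvCnt nums k i)).sum,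
       pvOddIn nums i (i + n)) := by
  induction n with
  | zero => simp [PySem.List.pyRange_one_eq_nil le_rfl, pvOddIn_self]
  | succ n ih =>
    have h1 : i ≤ i + (n : Int) := by omega
    have hsplit : (i + ((n : Int) + 1)) = (i + (n : Int)) + 1 := by ring
    rw [show ((n : Nat) + 1 : Nat) = n + 1 from rfl]
    push_cast [hsplit] at *
    rw [PySem.List.pyRange_one_succ_right (a := i) (b := i + (n:Int)) h1]
    rw [List.foldl_append, List.map_append, ih]
    simp only [List.foldl_cons, List.foldl_nil, List.map_cons, List.map_nil, List.sum_append,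
      List.sum_cons, List.sum_nil]
    rw [pvOddIn_succ nums i (i + (n:Int)) h1]
    unfold pvCnt
    rw [pvOddIn_succ nums i (i + (n:Int)) h1]
    by_cases hm : PySem.Int.mod (PySem.List.pyGetD nums (i + (n:Int)) 0) 2 = 1 <;>
      simp only [Prod.mk.injEq, hm] <;> norm_num <;> split_ifs <;> simp_all <;> omega

theorem pvB_eq_ref (nums : List Int) (k : Int) :
    evenSubarray_alt nums k = pvRef nums k := by
  unfold evenSubarray_alt pvRef
  simp only []
  have hout : ∀ (l : List Int) (c : Int), (∀ i ∈ l, 0 ≤ i ∧ i ≤ (nums.length : Int)) →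
      l.foldl (fun count i =>
        ((PySem.List.pyRange i (nums.length : Int) 1).foldl (fun (s : Int × Int) j =>
          let odd : Int :=
            if PySem.Int.mod (PySem.List.pyGetD nums j 0) 2 = 1 then s.2 + 1 else s.2
          let count : Int := if k ≤ j - i + 1 ∧ odd ≤ k then s.1 + 1 else s.1
          (count, odd)) (count, 0)).1) c
      = c + (l.map (fun i =>
          ((PySem.List.pyRange i (nums.length : Int) 1).map (pvCnt nums k i)).sum)).sum := by
    intro l
    induction l with
    | nil => simp
    | cons i t ih =>
      intro c hmem
      have hi := hmem i (by simp)
      have hN : (nums.length : Int) = i + ((nums.length : Int) - i).toNat := by omega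
      simp only [List.foldl_cons, List.map_cons, List.sum_cons]
      rw [ih _ (fun x hx => hmem x (by simp [hx]))]
      conv_lhs => rw [hN]
      rw [pvB_inner]
      rw [← hN]
      ring
  rw [hout _ 0 (by intro i hi; rw [PySem.List.mem_pyRange_one] at hi; omega)]
  simp

-- ===== VERDICT (by name: the statement is the Claim_ definition above) =====
theorem evenSubarray_spec : Claim_equal_evenSubarray := by
  intro nums k _
  unfold Spec_evenSubarray
  rw [pvA_eq_ref, pvB_eq_ref]
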